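-- pv_equiv track=rewrite | github.com/JDkeyzl/testback | backend/app/services/common_features_analyzer.py | _count_distribution
-- ===== SOURCE A (Python) =====
-- from typing import Dict, Any, List, Optional
--
-- def _count_distribution(values: List[Any]) -> Dict[str, int]:
--     """统计分布"""
--     if not values:
--         return {}
--
--     distribution = {}
--     for v in values:
--         if v is not None:
--             key = str(v)
--             distribution[key] = distribution.get(key, 0) + 1
--
--     return distribution
-- ===== SOURCE B (Python) =====
-- from typing import Dict, Any, List, Optional
--
-- def _count_distribution(values: List[Any]) -> Dict[str, int]:
--     """统计分布: dedupe the keys in first-occurrence order, then count each key."""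
--     strs = [str(v) for v in values if v is not None]
--     keys = list(dict.fromkeys(strs))
--     return {k: strs.count(k) for k in keys}
-- ===== Notes on version B (the rewrite author's own statement) =====
-- stated objective: alternative
-- what changed: Replaces the single incremental hash-counting loop by a two-pass scheme: build the list of non-None string keys, dedupe it in first-occurrence order with dict.fromkeys, then count each distinct key with list.count; the empty-input guard disappears.
import Mathlib
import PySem

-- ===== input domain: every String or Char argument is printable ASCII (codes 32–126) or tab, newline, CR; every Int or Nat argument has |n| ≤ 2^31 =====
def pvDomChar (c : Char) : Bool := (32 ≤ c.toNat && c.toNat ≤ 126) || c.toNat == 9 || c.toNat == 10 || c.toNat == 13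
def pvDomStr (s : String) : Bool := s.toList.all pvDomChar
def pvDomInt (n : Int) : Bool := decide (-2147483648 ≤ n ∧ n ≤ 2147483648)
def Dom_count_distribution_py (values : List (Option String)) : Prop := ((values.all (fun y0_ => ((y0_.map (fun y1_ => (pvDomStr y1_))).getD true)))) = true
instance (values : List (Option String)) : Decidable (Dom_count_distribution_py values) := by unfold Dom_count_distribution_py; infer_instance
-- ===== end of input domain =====

-- ===== PORT A =====
-- A: single pass building a counting dict (distribution[key] = distribution.get(key, 0) + 1).
def count_distribution_py (values : List (Option String)) : List (String × Int) :=
  if values = [] then []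
  else
    (values.foldl (fun d v =>
      match v with
      | none => d
      | some s => d.insert s (d.getD s 0 + 1)) (PySem.Dict.empty : PySem.Dict String Int)).items

-- ===== PORT B =====
-- B: collect the non-None strings, dedupe in first-occurrence order, count each key.
def count_distribution_py_alt (values : List (Option String)) : List (String × Int) :=
  let strs := values.filterMap (fun v => v.map (fun s => s))
  let keys := PySem.List.dedup strs
  keys.map (fun k => (k, (PySem.List.count strs k : Int)))

-- ===== PRECONDITION & SPEC =====
def Spec_count_distribution_py (values : List (Option String)) (out : List (String × Int)) : Prop := out = count_distribution_py_alt values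
instance (values : List (Option String)) (out : List (String × Int)) : Decidable (Spec_count_distribution_py values out) := by unfold Spec_count_distribution_py; infer_instance

-- ===== CLAIM (what is proved, stated in full; the proofs are below) =====
def Claim_equal_count_distribution_py : Prop := ∀ (values : List (Option String)), Dom_count_distribution_py values → Spec_count_distribution_py values (count_distribution_py values)

-- ===== LEMMAS AND PROOFS =====

-- ===== VERDICT (by name: the statement is the Claim_ definition above) =====
-- skipping None inline in A's fold is the same as folding over the filtered string list
lemma foldl_skip_none (values : List (Option String)) (d : PySem.Dict String Int) :
    values.foldl (fun d v =>
      match v with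
      | none => d
      | some s => d.insert s (d.getD s 0 + 1)) d
    = (values.filterMap (fun v => v.map (fun s => s))).foldl
        (fun d s => d.insert s (d.getD s 0 + 1)) d := by
  induction values generalizing d with
  | nil => rfl
  | cons v t ih => cases v <;> simp [List.foldl, ih]

theorem count_distribution_py_spec : Claim_equal_count_distribution_py := by
  intro values _
  unfold Spec_count_distribution_py count_distribution_py count_distribution_py_alt
  by_cases h : values = []
  · subst h; rfl
  · simp only [h, if_false, foldl_skip_none,
      PySem.Dict.foldl_insert_getD_add_one_eq_counter, PySem.Dict.items_counter,
      PySem.List.dedup_eq_ofList, PySem.List.count_eq]
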